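-- pv_equiv track=rewrite | github.com/Megha9306/matrimonial-etl-pipeline | llmextractor.py | _choose_fallback_model
-- ===== SOURCE A (Python) =====
-- from typing import Optional, List, Dict, Any
--
-- def _choose_fallback_model(available: List[str]) -> Optional[str]:
--     """
--     Pick a sensible fallback model from a list of available models.
--     Preference is given to known OpenAI models that are likely supported.
--     """
--     if not available:
--         return None
--     preferred = [
--         "gpt-4o",
--         "gpt-4o-mini",
--         "gpt-4",
--         "gpt-3.5-turbo-16k",
--         "gpt-3.5-turbo",
--     ]
--     for p in preferred:
--         for m in available:
--             if p in m:
--                 return m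
--     # fallback to first available
--     return available[0]
-- ===== SOURCE B (Python) =====
-- from typing import Optional, List
--
-- _PREFERRED = [
--     "gpt-4o",
--     "gpt-4o-mini",
--     "gpt-4",
--     "gpt-3.5-turbo-16k",
--     "gpt-3.5-turbo",
-- ]
--
-- def _rank(m: str) -> int:
--     # smallest preference index whose pattern occurs in m; len(_PREFERRED) if none
--     return min((i for i, p in enumerate(_PREFERRED) if p in m), default=len(_PREFERRED))
--
-- def _choose_fallback_model(available: List[str]) -> Optional[str]:
--     if not available:
--         return None
--     return min(available, key=_rank)
-- ===== Notes on version B (the rewrite author's own statement) =====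
-- stated objective: simpler
-- what changed: Replaces the preference-outer nested loops with early return by a single pass: each model gets a rank (its smallest matching preference index, default len(preferred)) and min(available, key=rank) picks the winner, with Python's first-minimum tie-break reproducing A's order exactly.
import Mathlib
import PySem

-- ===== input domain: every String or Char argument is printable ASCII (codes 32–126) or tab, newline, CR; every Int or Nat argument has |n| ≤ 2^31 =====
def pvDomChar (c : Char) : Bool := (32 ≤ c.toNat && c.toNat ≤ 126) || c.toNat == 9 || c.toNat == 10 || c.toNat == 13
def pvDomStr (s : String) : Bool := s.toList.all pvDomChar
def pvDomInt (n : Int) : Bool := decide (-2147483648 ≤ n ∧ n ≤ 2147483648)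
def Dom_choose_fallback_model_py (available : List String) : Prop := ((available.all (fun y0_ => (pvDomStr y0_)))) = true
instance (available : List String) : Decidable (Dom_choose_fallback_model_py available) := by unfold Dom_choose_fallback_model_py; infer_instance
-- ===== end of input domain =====

-- B replaces A's preference-outer nested loops (early return) by one pass: each model gets a
-- rank = smallest matching preference index, and min(available, key=rank) (first minimum) wins.
-- Objective: simpler decomposition, same cost.

-- ===== PORT A =====
-- inner loop: 'for m in available: if p in m: return m'
def pvInnerA (p : String) : List String → Option String
  | [] => none
  | m :: ms => if PySem.Str.isIn p m then some m else pvInnerA p ms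

-- outer loop: 'for p in preferred: …'
def pvOuterA : List String → List String → Option String
  | [], _ => none
  | p :: ps, available =>
    match pvInnerA p available with
    | some m => some m
    | none => pvOuterA ps available

def pvPreferred : List String :=
  ["gpt-4o", "gpt-4o-mini", "gpt-4", "gpt-3.5-turbo-16k", "gpt-3.5-turbo"]

def choose_fallback_model_py (available : List String) : Option String :=
  if available.isEmpty then none
  else
    match pvOuterA pvPreferred available with
    | some m => some m
    | none => PySem.List.pyGet? available 0   -- available[0]; in range: the guard ensured nonempty

-- ===== PORT B =====
-- min((i for i,p in enumerate(preferred) if p in m), default=len(preferred)): indices ascend, so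
-- the minimum is the first match; the running counter i ends at len(preferred) when none match.
def pvPreferredB : List String :=
  ["gpt-4o", "gpt-4o-mini", "gpt-4", "gpt-3.5-turbo-16k", "gpt-3.5-turbo"]

def pvRankFrom (m : String) : List String → Nat → Nat
  | [], i => i
  | p :: ps, i => if PySem.Str.isIn p m then i else pvRankFrom m ps (i + 1)

def pvRank (m : String) : Nat := pvRankFrom m pvPreferredB 0

-- min(available, key=_rank): Python keeps the FIRST minimum (strict '<' to replace)
def choose_fallback_model_py_alt (available : List String) : Option String :=
  match available with
  | [] => none
  | x :: xs => some (xs.foldl (fun best m => if pvRank m < pvRank best then m else best) x)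

-- ===== PRECONDITION & SPEC =====
def Spec_choose_fallback_model_py (available : List String) (out : Option String) : Prop := out = choose_fallback_model_py_alt available
instance (available : List String) (out : Option String) : Decidable (Spec_choose_fallback_model_py available out) := by unfold Spec_choose_fallback_model_py; infer_instance

-- ===== CLAIM (what is proved, stated in full; the proofs are below) =====
def Claim_equal_choose_fallback_model_py : Prop := ∀ (available : List String), Dom_choose_fallback_model_py available → Spec_choose_fallback_model_py available (choose_fallback_model_py available)

-- ===== LEMMAS AND PROOFS =====

-- generic first-minimum fold
def pvMinFold (key : String → Nat) (b : String) (xs : List String) : String :=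
  xs.foldl (fun best m => if key m < key best then m else best) b

theorem pvMinFold_congr (k₁ k₂ : String → Nat) (b : String) (xs : List String)
    (h : ∀ m ∈ b :: xs, k₁ m = k₂ m) : pvMinFold k₁ b xs = pvMinFold k₂ b xs := by
  induction xs generalizing b with
  | nil => rfl
  | cons x xs ih =>
    have hx := h x (by simp)
    have hb := h b (by simp)
    simp only [pvMinFold, List.foldl] at *
    rw [hx, hb]
    split
    · exact ih x (fun m hm => h m (by
        rcases List.mem_cons.mp hm with rfl | hm
        · simp
        · simp [hm]))
    · exact ih b (fun m hm => h m (by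
        rcases List.mem_cons.mp hm with rfl | hm
        · simp
        · simp [hm]))

theorem pvMinFold_shift (k : String → Nat) (b : String) (xs : List String) :
    pvMinFold (fun m => 1 + k m) b xs = pvMinFold k b xs := by
  have hfun : (fun (best m : String) => if 1 + k m < 1 + k best then m else best)
      = (fun best m => if k m < k best then m else best) := by
    funext best m
    simp
  simp only [pvMinFold, hfun]

theorem pvMinFold_keyzero (k : String → Nat) (b : String) (xs : List String)
    (hb : k b = 0) : pvMinFold k b xs = b := by
  induction xs with
  | nil => rfl
  | cons x xs ih =>
    simp only [pvMinFold, List.foldl] at *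
    rw [if_neg (by omega)]
    exact ih

theorem pvMinFold_findzero (k : String → Nat) (b : String) (xs : List String) (m₀ : String)
    (hb : k b ≠ 0) (hf : xs.find? (fun m => k m == 0) = some m₀) :
    pvMinFold k b xs = m₀ := by
  induction xs generalizing b with
  | nil => simp at hf
  | cons x xs ih =>
    simp only [pvMinFold, List.foldl] at *
    by_cases hx : k x = 0
    · rw [List.find?_cons_of_pos (by simp [hx])] at hf
      rw [if_pos (by omega)]
      rw [Option.some_inj] at hf
      subst hf
      exact pvMinFold_keyzero k x xs hx
    · rw [List.find?_cons_of_neg (by simp [hx])] at hf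
      split <;> exact ih _ (by assumption) hf

theorem pvInnerA_eq_find? (p : String) (xs : List String) :
    pvInnerA p xs = xs.find? (fun m => PySem.Str.isIn p m) := by
  induction xs with
  | nil => rfl
  | cons x xs ih =>
    simp only [pvInnerA, List.find?, ih]
    cases PySem.Str.isIn p x <;> rfl

theorem pvRankFrom_succ (m : String) (ps : List String) (i : Nat) :
    pvRankFrom m ps (i + 1) = 1 + pvRankFrom m ps i := by
  induction ps generalizing i with
  | nil =>
    unfold pvRankFrom
    omega
  | cons p ps ih =>
    unfold pvRankFrom
    by_cases h : PySem.Str.isIn p m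
    · rw [if_pos h, if_pos h]
      omega
    · rw [if_neg h, if_neg h]
      exact ih (i + 1)

-- main lemma: A's nested loops on a nonempty list agree with B's first-minimum-by-rank fold,
-- for ANY preference list P
theorem pv_main (P : List String) (x : String) (xs : List String) :
    (match pvOuterA P (x :: xs) with
     | some m => some m
     | none => PySem.List.pyGet? (x :: xs) 0) =
    some (pvMinFold (fun m => pvRankFrom m P 0) x xs) := by
  induction P with
  | nil =>
    simp [pvOuterA, PySem.List.pyGet?, PySem.List.pyIdx?,
      pvMinFold_keyzero (fun m => pvRankFrom m [] 0) x xs rfl]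
  | cons p ps ih =>
    simp only [pvOuterA, pvInnerA_eq_find?]
    by_cases hx : PySem.Str.isIn p x = true
    · rw [List.find?_cons_of_pos (by simpa using hx)]
      simp only [Option.some_inj]
      rw [pvMinFold_keyzero _ x xs (by unfold pvRankFrom; rw [if_pos hx])]
    · rw [List.find?_cons_of_neg (by simpa using hx)]
      rcases hfind : xs.find? (fun m => PySem.Str.isIn p m) with _ | m₀
      · -- nobody matches p: all ranks shift by one, reduce to the IH
        have hall : ∀ m ∈ x :: xs, ¬ (PySem.Str.isIn p m = true) := by
          intro m hm
          rcases List.mem_cons.mp hm with rfl | hm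
          · exact hx
          · exact fun hc => by
              have := List.find?_eq_none.mp hfind m hm
              exact this hc
        have hcongr : pvMinFold (fun m => pvRankFrom m (p :: ps) 0) x xs
            = pvMinFold (fun m => pvRankFrom m ps 0) x xs := by
          rw [pvMinFold_congr (fun m => pvRankFrom m (p :: ps) 0)
              (fun m => 1 + pvRankFrom m ps 0) x xs
              (fun m hm => by
                have hnm := hall m hm
                show pvRankFrom m (p :: ps) 0 = 1 + pvRankFrom m ps 0
                rw [show pvRankFrom m (p :: ps) 0
                    = if PySem.Str.isIn p m then 0 else pvRankFrom m ps (0 + 1) from rfl,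
                  if_neg hnm, pvRankFrom_succ])]
          exact pvMinFold_shift _ x xs
        rw [hcongr]
        exact ih
      · -- first match of p within xs (x does not match): that element wins with rank 0
        simp only [Option.some_inj]
        have hpred : (fun m => (pvRankFrom m (p :: ps) 0 == 0)) = (fun m => PySem.Str.isIn p m) := by
          funext m
          show (pvRankFrom m (p :: ps) 0 == 0) = PySem.Str.isIn p m
          rw [show pvRankFrom m (p :: ps) 0
              = if PySem.Str.isIn p m then 0 else pvRankFrom m ps (0 + 1) from rfl]
          by_cases h : PySem.Str.isIn p m
          · rw [if_pos h, h]
            rfl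
          · rw [if_neg h, pvRankFrom_succ]
            rw [Bool.not_eq_true] at h
            rw [h]
            exact beq_eq_false_iff_ne.mpr (by omega)
        rw [pvMinFold_findzero (fun m => pvRankFrom m (p :: ps) 0) x xs m₀
            (by
              show pvRankFrom x (p :: ps) 0 ≠ 0
              rw [show pvRankFrom x (p :: ps) 0
                  = if PySem.Str.isIn p x then 0 else pvRankFrom x ps (0 + 1) from rfl,
                if_neg hx, pvRankFrom_succ]
              omega)
            (by rw [hpred]; exact hfind)]

-- ===== VERDICT (by name: the statement is the Claim_ definition above) =====
theorem choose_fallback_model_py_spec : Claim_equal_choose_fallback_model_py := by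
  intro available _
  unfold Spec_choose_fallback_model_py
  cases available with
  | nil => rfl
  | cons x xs =>
    unfold choose_fallback_model_py choose_fallback_model_py_alt
    rw [if_neg (by simp)]
    exact pv_main pvPreferred x xs
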